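/- GENERATED by c/gen_decode.py: decode facts of the image, one per distinct instruction byte string. -/
import UserX.DecodeImage

#decode_all Vorbis.Dec
  "0f28c5"  -- movaps xmm0,xmm5
  "0f844b010000"  -- je 113de5
  "0f84f0000000"  -- je 10f639
  "0f882c010000"  -- js 10e8f1
  "0f8f25010000"  -- jg 1155c7
  "0fb685d4050000"  -- movzx eax,BYTE PTR [rbp+0x5d4]
  "3983a0000000"  -- cmp DWORD PTR [rbx+0xa0],eax
  "410fb607"  -- movzx eax,BYTE PTR [r15]
  "4139f7"  -- cmp r15d,esi
  "41885e18"  -- mov BYTE PTR [r14+0x18],bl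
  "418b461c"  -- mov eax,DWORD PTR [r14+0x1c]
  "41c704240a000000"  -- mov DWORD PTR [r12],0xa
  "438d1437"  -- lea edx,[r15+r14*1]
  "4439b540010000"  -- cmp DWORD PTR [rbp+0x140],r14d
  "44896d04"  -- mov DWORD PTR [rbp+0x4],r13d
  "4489f0"  -- mov eax,r14d
  "448ba540080000"  -- mov r12d,DWORD PTR [rbp+0x840]
  "4539661c"  -- cmp DWORD PTR [r14+0x1c],r12d
  "458b2c24"  -- mov r13d,DWORD PTR [r12]
  "4801ed"  -- add rbp,rbp
  "48636c2408"  -- movsxd rbp,DWORD PTR [rsp+0x8]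
  "4881ffffffff00"  -- cmp rdi,0xffffff
  "48893424"  -- mov QWORD PTR [rsp],rsi
  "4889da"  -- mov rdx,rbx
  "488b742410"  -- mov rsi,QWORD PTR [rsp+0x10]
  "488d1c90"  -- lea rbx,[rax+rdx*4]
  "488d7b1c"  -- lea rdi,[rbx+0x1c]
  "488d842480000000"  -- lea rax,[rsp+0x80]
  "488dbbf4060000"  -- lea rdi,[rbx+0x6f4]
  "48b8ffffffffffffef7f"  -- movabs rax,0x7fefffffffffffff
  "48c78578ffffff600b1200"  -- mov QWORD PTR [rbp-0x88],0x120b60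
  "4963df"  -- movsxd rbx,r15d
  "4989fd"  -- mov r13,rdi
  "498d7d0c"  -- lea rdi,[r13+0xc]
  "498dbfe8060000"  -- lea rdi,[r15+0x6e8]
  "4a8dbcb480020000"  -- lea rdi,[rsp+r14*4+0x280]
  "4c63742410"  -- movsxd r14,DWORD PTR [rsp+0x10]
  "4c89e6"  -- mov rsi,r12
  "4c8bb550ffffff"  -- mov r14,QWORD PTR [rbp-0xb0]
  "4d032e"  -- add r13,QWORD PTR [r14]
  "4d8d64c500"  -- lea r12,[r13+rax*8+0x0]
  "660f2f0424"  -- comisd xmm0,QWORD PTR [rsp]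
  "66410f6eff"  -- movd xmm7,r15d
  "668974242c"  -- mov WORD PTR [rsp+0x2c],si
  "742a"  -- je 10451b
  "7519"  -- jne 10dc8f
  "7827"  -- js 10b9c3
  "7e28"  -- jle 1098a0
  "807c240f00"  -- cmp BYTE PTR [rsp+0xf],0x0
  "83bd6cffffff02"  -- cmp DWORD PTR [rbp-0x94],0x2
  "8918"  -- mov DWORD PTR [rax],ebx
  "8982e8060000"  -- mov DWORD PTR [rdx+0x6e8],eax
  "89fd"  -- mov ebp,edi
  "8b6be4"  -- mov ebp,DWORD PTR [rbx-0x1c]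
  "8bac24bc000000"  -- mov ebp,DWORD PTR [rsp+0xbc]
  "ba06000000"  -- mov edx,0x6
  "c1ff02"  -- sar edi,0x2
  "c7830400c000f1f104f2"  -- mov DWORD PTR [rbx+0xc00004],0xf204f1f1
  "e80130ffff"  -- call 100640
  "e80af8ffff"  -- call 100059
  "e815d9feff"  -- call 100720
  "e81e78ffff"  -- call 100300
  "e828f3feff"  -- call 1008e0
  "e8310effff"  -- call 100800
  "e83bd3ffff"  -- call 100720
  "e8476cffff"  -- call 100640
  "e851aeffff"  -- call 100640
  "e85d14ffff"  -- call 100640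
  "e86a71ffff"  -- call 100640
  "e875d3ffff"  -- call 100720
  "e87ff8feff"  -- call 100800
  "e88bfaffff"  -- call 113160
  "e8956dffff"  -- call 10b980
  "e89f8effff"  -- call 10d040
  "e8aa36ffff"  -- call 100640
  "e8b37cffff"  -- call 104c60
  "e8bdfcffff"  -- call 107500
  "e8c886ffff"  -- call 100720
  "e8d1d3ffff"  -- call 100640
  "e8dbecffff"  -- call 100300
  "e8e5bafeff"  -- call 100640
  "e8ee0dffff"  -- call 100800
  "e8f89cffff"  -- call 113840
  "e914fbffff"  -- jmp 113b22
  "e960feffff"  -- jmp 110e60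
  "e9ad000000"  -- jmp 109471
  "e9fed8ffff"  -- jmp 113b22
  "eb96"  -- jmp 10cd44
  "ebef"  -- jmp 10751c
  "f20f58da"  -- addsd xmm3,xmm2
  "f20f5e1da7da0100"  -- divsd xmm3,QWORD PTR [rip+0x1daa7]
  "f30f1055bc"  -- movss xmm2,DWORD PTR [rbp-0x44]
  "f30f107c2414"  -- movss xmm7,DWORD PTR [rsp+0x14]
  "f30f1155a4"  -- movss DWORD PTR [rbp-0x5c],xmm2
  "f30f117c2428"  -- movss DWORD PTR [rsp+0x28],xmm7
  "f30f590559470100"  -- mulss xmm0,DWORD PTR [rip+0x14759]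
  "f30f5c55a8"  -- subss xmm2,DWORD PTR [rbp-0x58]
  "f3410f105424f8"  -- movss xmm2,DWORD PTR [r12-0x8]
  "f644241801"  -- test BYTE PTR [rsp+0x18],0x1
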